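-- pv_equiv track=rewrite | github.com/AltivumInc-Admin/your6 | lambda/ai_personalizer.py | _intelligently_shorten
-- ===== SOURCE A (Python) =====
-- def _intelligently_shorten(text: str, max_length: int) -> str:
--     """Shorten text while preserving key information"""
--     if len(text) <= max_length:
--         return text
--
--     # Preserve crisis resources
--     crisis_line = "Veterans Crisis Line: 1-800-273-8255 (press 1)"
--     has_crisis = crisis_line in text
--
--     # Split into sentences
--     sentences = text.split('. ')
--
--     # Prioritize sentences
--     prioritized = []
--     for sent in sentences:
--         if crisis_line in sent:
--             priority = 1
--         elif any(word in sent.lower() for word in ['help', 'support', 'reach out']):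
--             priority = 2
--         else:
--             priority = 3
--         prioritized.append((priority, sent))
--
--     # Sort by priority
--     prioritized.sort(key=lambda x: x[0])
--
--     # Reconstruct
--     result = []
--     current_length = 0
--
--     for _, sent in prioritized:
--         if current_length + len(sent) + 2 <= max_length:
--             result.append(sent)
--             current_length += len(sent) + 2
--
--     return '. '.join(result) + '.'
-- ===== SOURCE B (Python) =====
-- def _intelligently_shorten(text: str, max_length: int) -> str:
--     """Shorten text while preserving key information (bucket passes instead of sort)."""
--     if len(text) <= max_length:
--         return text
--
--     crisis_line = "Veterans Crisis Line: 1-800-273-8255 (press 1)"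
--
--     def priority(sent):
--         if crisis_line in sent:
--             return 1
--         low = sent.lower()
--         if 'help' in low or 'support' in low or 'reach out' in low:
--             return 2
--         return 3
--
--     sentences = text.split('. ')
--     result = []
--     current_length = 0
--     for level in (1, 2, 3):
--         for sent in sentences:
--             if priority(sent) == level and current_length + len(sent) + 2 <= max_length:
--                 result.append(sent)
--                 current_length += len(sent) + 2
--     return '. '.join(result) + '.'
-- ===== Notes on version B (the rewrite author's own statement) =====
-- stated objective: simpler
-- what changed: B drops the tuple-building pass and the stable sort: it makes three ordered passes over the split sentences (priority levels 1,2,3), appending each qualifying sentence with the same greedy length check, exploiting that a stable sort by a 3-valued key is just bucket concatenation.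
import Mathlib
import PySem

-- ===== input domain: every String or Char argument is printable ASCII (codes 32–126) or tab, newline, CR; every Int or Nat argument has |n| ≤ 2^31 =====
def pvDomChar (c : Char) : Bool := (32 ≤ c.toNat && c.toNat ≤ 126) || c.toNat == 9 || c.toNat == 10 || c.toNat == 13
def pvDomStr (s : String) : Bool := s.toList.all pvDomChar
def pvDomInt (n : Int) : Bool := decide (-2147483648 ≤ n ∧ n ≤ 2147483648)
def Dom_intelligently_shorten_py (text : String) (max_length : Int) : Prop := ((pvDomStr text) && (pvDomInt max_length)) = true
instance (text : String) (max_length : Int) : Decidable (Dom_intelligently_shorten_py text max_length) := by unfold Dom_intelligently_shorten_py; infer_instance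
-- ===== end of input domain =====

-- B replaces the tuple-list + stable sort of A by three ordered passes over the sentences
-- (priority buckets 1, 2, 3) with the identical greedy length check: simpler, no sort.


-- ===== PORT A =====
def pvCrisis : List Char := "Veterans Crisis Line: 1-800-273-8255 (press 1)".toList

def pvSep : List Char := ". ".toList

-- priority computed inside A's loop: crisis line → 1, any of the keywords in sent.lower() → 2, else 3
def pvPrioA (sent : List Char) : Int :=
  if PySem.Chars.isIn pvCrisis sent then 1
  else if ["help".toList, "support".toList, "reach out".toList].any
            (fun w => PySem.Chars.isIn w (PySem.Chars.lower sent)) then 2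
  else 3

def intelligently_shorten_py (text : String) (max_length : Int) : String :=
  if PySem.Str.len text ≤ max_length then text
  else
    let _has_crisis := PySem.Chars.isIn pvCrisis text.toList  -- computed by A, never used
    let sentences := PySem.Chars.splitOn text.toList pvSep
    let prioritized : List (Int × List Char) :=
      sentences.foldl (fun acc sent => acc ++ [(pvPrioA sent, sent)]) []
    let sortedP := PySem.List.sorted prioritized (fun p => p.1)
    let st := sortedP.foldl
      (fun (st : List (List Char) × Int) p =>
        if st.2 + (p.2.length : Int) + 2 ≤ max_length
        then (st.1 ++ [p.2], st.2 + (p.2.length : Int) + 2) else st)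
      ([], 0)
    String.ofList (PySem.Chars.join pvSep st.1 ++ ['.'])

-- ===== PORT B =====
def pvPrioB (sent : List Char) : Int :=
  if PySem.Chars.isIn pvCrisis sent then 1
  else
    let low := PySem.Chars.lower sent
    if PySem.Chars.isIn "help".toList low || PySem.Chars.isIn "support".toList low
       || PySem.Chars.isIn "reach out".toList low then 2
    else 3

def intelligently_shorten_py_alt (text : String) (max_length : Int) : String :=
  if PySem.Str.len text ≤ max_length then text
  else
    let sentences := PySem.Chars.splitOn text.toList pvSep
    let st := [(1 : Int), 2, 3].foldl
      (fun st level => sentences.foldl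
        (fun (st : List (List Char) × Int) sent =>
          if pvPrioB sent = level ∧ st.2 + (sent.length : Int) + 2 ≤ max_length
          then (st.1 ++ [sent], st.2 + (sent.length : Int) + 2) else st)
        st)
      ([], 0)
    String.ofList (PySem.Chars.join pvSep st.1 ++ ['.'])

-- ===== PRECONDITION & SPEC =====
def Spec_intelligently_shorten_py (text : String) (max_length : Int) (out : String) : Prop := out = intelligently_shorten_py_alt text max_length
instance (text : String) (max_length : Int) (out : String) : Decidable (Spec_intelligently_shorten_py text max_length out) := by unfold Spec_intelligently_shorten_py; infer_instance

-- ===== CLAIM (what is proved, stated in full; the proofs are below) =====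
def Claim_equal_intelligently_shorten_py : Prop := ∀ (text : String) (max_length : Int), Dom_intelligently_shorten_py text max_length → Spec_intelligently_shorten_py text max_length (intelligently_shorten_py text max_length)

-- ===== LEMMAS AND PROOFS =====

theorem pvPrioB_eq_prioA (s : List Char) : pvPrioB s = pvPrioA s := by
  simp [pvPrioA, pvPrioB, List.any, Bool.or_assoc]

theorem pvPrioA_range (s : List Char) : pvPrioA s = 1 ∨ pvPrioA s = 2 ∨ pvPrioA s = 3 := by
  unfold pvPrioA; split_ifs <;> simp

-- stable insertion point: x goes after ys (all not-before) and before zs (all before)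
theorem insertBy_middle {α : Type} (before : α → α → Bool) (x : α) (ys zs : List α)
    (hy : ∀ y ∈ ys, before x y = false) (hz : ∀ z ∈ zs, before x z = true) :
    PySem.List.insertBy before x (ys ++ zs) = ys ++ x :: zs := by
  induction ys with
  | nil =>
    cases zs with
    | nil => rfl
    | cons z zs' => simp [PySem.List.insertBy, hz z (by simp)]
  | cons y ys' ih =>
    have hy0 := hy y (by simp)
    simp [PySem.List.insertBy, hy0]
    exact ih (fun y' h => hy y' (by simp [h]))

def pvBucket (j : Int) (xs : List (List Char)) : List (Int × List Char) :=
  (xs.filter (fun s => pvPrioA s = j)).map (fun s => (pvPrioA s, s))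

theorem mem_pvBucket_fst {j : Int} {xs : List (List Char)} {p : Int × List Char}
    (h : p ∈ pvBucket j xs) : p.1 = j := by
  simp only [pvBucket, List.mem_map, List.mem_filter] at h
  obtain ⟨s, ⟨-, hs⟩, rfl⟩ := h
  simpa using hs

-- the stable sort of the (priority, sentence) list is bucket concatenation
theorem sorted_eq_buckets (xs : List (List Char)) :
    PySem.List.sorted (xs.map (fun s => (pvPrioA s, s))) (fun p => p.1)
      = pvBucket 1 xs ++ pvBucket 2 xs ++ pvBucket 3 xs := by
  rw [PySem.List.sorted_eq_foldl_insertBy]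
  induction xs using List.reverseRecOn with
  | nil => simp [pvBucket]
  | append_singleton ys x ih =>
    rw [List.map_append, List.foldl_append, ih]
    have hb : ∀ j, pvBucket j (ys ++ [x]) =
        pvBucket j ys ++ (if pvPrioA x = j then [(pvPrioA x, x)] else []) := by
      intro j
      simp only [pvBucket, List.filter_append, List.map_append]
      by_cases h : pvPrioA x = j <;> simp [h]
    simp only [List.foldl_cons, List.foldl_nil, List.map_cons, List.map_nil, hb]
    rcases pvPrioA_range x with h | h | h <;> rw [h] 
    · -- priority 1: insert at end of bucket 1
      rw [show pvBucket 1 ys ++ pvBucket 2 ys ++ pvBucket 3 ys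
            = pvBucket 1 ys ++ (pvBucket 2 ys ++ pvBucket 3 ys) by simp [List.append_assoc]]
      rw [insertBy_middle _ _ _ _
        (fun y hy => by have := mem_pvBucket_fst hy; simp [this])
        (fun z hz => by
          rcases List.mem_append.1 hz with hz | hz <;>
            · have := mem_pvBucket_fst hz; simp [this])]
      simp [List.append_assoc]
    · -- priority 2: insert at end of bucket 2
      rw [show pvBucket 1 ys ++ pvBucket 2 ys ++ pvBucket 3 ys
            = (pvBucket 1 ys ++ pvBucket 2 ys) ++ pvBucket 3 ys by simp [List.append_assoc]]
      rw [insertBy_middle _ _ _ _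
        (fun y hy => by
          rcases List.mem_append.1 hy with hy | hy <;>
            · have := mem_pvBucket_fst hy; simp [this])
        (fun z hz => by have := mem_pvBucket_fst hz; simp [this])]
      simp [List.append_assoc]
    · -- priority 3: insert at the very end
      rw [PySem.List.insertBy_of_forall_not_before _ _ _
        (fun y hy => by
          rcases List.mem_append.1 hy with hy | hy
          · rcases List.mem_append.1 hy with hy | hy <;>
              · have := mem_pvBucket_fst hy; simp [this]
          · have := mem_pvBucket_fst hy; simp [this])]
      simp [List.append_assoc]

-- B's pass at level j over all sentences = A's greedy fold over bucket j
theorem pass_eq_bucket_fold (j : Int) (ml : Int) (xs : List (List Char))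
    (st : List (List Char) × Int) :
    xs.foldl
      (fun (st : List (List Char) × Int) sent =>
        if pvPrioA sent = j ∧ st.2 + (sent.length : Int) + 2 ≤ ml
        then (st.1 ++ [sent], st.2 + (sent.length : Int) + 2) else st) st
    = (pvBucket j xs).foldl
      (fun (st : List (List Char) × Int) p =>
        if st.2 + (p.2.length : Int) + 2 ≤ ml
        then (st.1 ++ [p.2], st.2 + (p.2.length : Int) + 2) else st) st := by
  induction xs generalizing st with
  | nil => rfl
  | cons s xs ih =>
    rw [List.foldl_cons]
    by_cases h : pvPrioA s = j
    · have hb : pvBucket j (s :: xs) = (pvPrioA s, s) :: pvBucket j xs := by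
        simp [pvBucket, h]
      rw [hb, List.foldl_cons]
      by_cases hf : st.2 + (s.length : Int) + 2 ≤ ml
      · rw [if_pos ⟨h, hf⟩, if_pos hf]; exact ih _
      · rw [if_neg (by tauto), if_neg hf]; exact ih st
    · have hb : pvBucket j (s :: xs) = pvBucket j xs := by
        simp [pvBucket, h]
      rw [hb, if_neg (by tauto)]
      exact ih st

-- ===== VERDICT (by name: the statement is the Claim_ definition above) =====
theorem intelligently_shorten_py_spec : Claim_equal_intelligently_shorten_py := by
  intro text max_length _
  show intelligently_shorten_py text max_length = intelligently_shorten_py_alt text max_length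
  unfold intelligently_shorten_py intelligently_shorten_py_alt
  by_cases h : PySem.Str.len text ≤ max_length
  · rw [if_pos h, if_pos h]
  · rw [if_neg h, if_neg h]
    simp only [pvPrioB_eq_prioA]
    rw [PySem.List.foldl_append_singleton_eq_map, List.nil_append, sorted_eq_buckets]
    rw [List.foldl_append, List.foldl_append]
    simp only [List.foldl_cons, List.foldl_nil]
    rw [pass_eq_bucket_fold, pass_eq_bucket_fold, pass_eq_bucket_fold]
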